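-- pv_equiv track=rewrite | github.com/Andreeoak/3ScheckoutDesafio | Problema3/Solution.py | min_turns_tabuleiro
-- ===== SOURCE A (Python) =====
-- from collections import deque
--
-- def min_turns_tabuleiro(n: int) -> int:
--     """
--     Calcula o número mínimo de turnos para chegar à última casa (n-1)
--     em um tabuleiro de n casas, seguindo as regras do jogo.
--
--     Args:
--         n: Número de casas no tabuleiro (n >= 3).
--
--     Returns:
--         O número mínimo de turnos para alcançar a casa n-1.
--     """
--     if not isinstance(n, int) or n < 3:
--         raise ValueError("O tabuleiro deve ter no mínimo 3 casas e n deve ser um inteiro positivo")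
--
--     alvo = n - 1
--     visitado = set([0])
--     fila = deque([(0, 0)])  # (posição, turnos)
--
--     while fila:
--         pos, turnos = fila.popleft()
--         if pos == alvo:
--             return turnos
--
--         for passo in (1, 2, 3):
--             prox = (pos + passo) % n
--             if prox not in visitado:
--                 visitado.add(prox)
--                 fila.append((prox, turnos + 1))
--
--     return -1  # fallback, nunca acontece para n >= 3
-- ===== SOURCE B (Python) =====
-- def min_turns_tabuleiro(n: int) -> int:
--     """Closed form: the minimum number of 1/2/3-steps summing to n-1 is ceil((n-1)/3)."""
--     return (n + 1) // 3
-- ===== Notes on version B (the rewrite author's own statement) =====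
-- stated objective: faster
-- what changed: Replaces the breadth-first search over the n-cell cycle by the closed form ceil((n-1)/3) = (n+1)//3, since the shortest 1/2/3-step path to cell n-1 never wraps.
import Mathlib
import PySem

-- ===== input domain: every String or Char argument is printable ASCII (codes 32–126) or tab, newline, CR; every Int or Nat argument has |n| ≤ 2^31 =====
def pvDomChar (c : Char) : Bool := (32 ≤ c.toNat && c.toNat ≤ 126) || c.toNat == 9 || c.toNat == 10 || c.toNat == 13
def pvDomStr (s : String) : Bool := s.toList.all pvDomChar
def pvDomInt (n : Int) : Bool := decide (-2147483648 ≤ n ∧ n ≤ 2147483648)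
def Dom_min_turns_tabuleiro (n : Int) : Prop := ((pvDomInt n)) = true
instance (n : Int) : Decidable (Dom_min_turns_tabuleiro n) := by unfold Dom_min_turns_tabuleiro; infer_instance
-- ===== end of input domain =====

-- B replaces A's breadth-first search over the n-cell cycle by the closed form (n+1)//3 (O(1) vs O(n)).


-- ===== PORT A =====
-- visitado is a Python set of ints consumed only through 'in'/'add'; Std.HashSet Int models that
-- exactly (membership semantics) and keeps the port evaluable in A's own O(n) time.
-- one pass of "for passo in (1, 2, 3)": state = (visitado, fila)
def pvStepA (n pos turnos : Int) (st : Std.HashSet Int × List (Int × Int)) (passo : Int) :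
    Std.HashSet Int × List (Int × Int) :=
  let prox := PySem.Int.mod (pos + passo) n
  if prox ∈ st.1 then st
  else (st.1.insert prox, st.2 ++ [(prox, turnos + 1)])

-- the "while fila:" loop; fuel bounds the number of pops (n.toNat + 1 always suffices for n ≥ 3)
def pvLoopA (n alvo : Int) : Nat → Std.HashSet Int × List (Int × Int) → Int
  | 0, _ => -1
  | _ + 1, (_, []) => -1
  | fuel + 1, (vis, (pos, turnos) :: rest) =>
    if pos = alvo then turnos
    else pvLoopA n alvo fuel ([(1 : Int), 2, 3].foldl (pvStepA n pos turnos) (vis, rest))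

def min_turns_tabuleiro (n : Int) : Int :=
  if n < 3 then -1  -- Python raises ValueError here; excluded by Pre_
  else pvLoopA n (n - 1) (n.toNat + 1) ((∅ : Std.HashSet Int).insert 0, [(0, 0)])

-- ===== PORT B =====
def min_turns_tabuleiro_alt (n : Int) : Int := PySem.Int.floordiv (n + 1) 3

-- ===== PRECONDITION & SPEC =====
-- A raises ValueError for n < 3; Pre_ excludes exactly those inputs.
def Pre_min_turns_tabuleiro (n : Int) : Prop := 3 ≤ n
instance (n : Int) : Decidable (Pre_min_turns_tabuleiro n) := by unfold Pre_min_turns_tabuleiro; infer_instance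
def pvWitness_min_turns_tabuleiro : Int := 7

def Spec_min_turns_tabuleiro (n : Int) (out : Int) : Prop := out = min_turns_tabuleiro_alt n
instance (n : Int) (out : Int) : Decidable (Spec_min_turns_tabuleiro n out) := by unfold Spec_min_turns_tabuleiro; infer_instance

-- ===== CLAIM (what is proved, stated in full; the proofs are below) =====
def Claim_equal_min_turns_tabuleiro : Prop := ∀ (n : Int), Dom_min_turns_tabuleiro n → Pre_min_turns_tabuleiro n → Spec_min_turns_tabuleiro n (min_turns_tabuleiro n)

-- ===== LEMMAS AND PROOFS =====

-- BFS assigns position q (1 ≤ q ≤ n-1) distance ceil(q/3) = (q+2)//3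
def pvC (q : Int) : Int := PySem.Int.floordiv (q + 2) 3

-- the queue when the front position is p: positions p .. min(p+2, n-1) with their distances
def pvQ (n p : Int) : List (Int × Int) :=
  if p + 2 ≤ n - 1 then [(p, pvC p), (p + 1, pvC (p + 1)), (p + 2, pvC (p + 2))]
  else if p + 1 ≤ n - 1 then [(p, pvC p), (p + 1, pvC (p + 1))]
  else [(p, pvC p)]

lemma pvMod_small (a n : Int) (h0 : 0 ≤ a) (h1 : a < n) : PySem.Int.mod a n = a := by
  rw [PySem.Int.mod_eq_emod_of_pos (by omega)]
  exact Int.emod_eq_of_lt h0 h1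

lemma pvMod_wrap (a n : Int) (h0 : n ≤ a) (h1 : a < 2 * n) (hn : 0 < n) :
    PySem.Int.mod a n = a - n := by
  rw [PySem.Int.mod_eq_emod_of_pos hn]
  conv_lhs => rw [show a = (a - n) + n by ring]
  rw [Int.add_emod_right]
  exact Int.emod_eq_of_lt (by omega) (by omega)

lemma pvC_succ3 (p : Int) : pvC (p + 3) = pvC p + 1 := by
  unfold pvC
  rw [PySem.Int.floordiv_eq_ediv_of_pos (by omega), PySem.Int.floordiv_eq_ediv_of_pos (by omega)]
  omega

-- main invariant: from front position p = n-1-d (1 ≤ p), queue pvQ n p, visited = {0 .. min(p+2,n-1)},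
-- the loop returns pvC (n-1) = (n+1)//3
lemma pvLoop_inv (n : Int) (hn : 3 ≤ n) :
    ∀ (d fuel : Nat) (p : Int) (vis : Std.HashSet Int),
      p = n - 1 - d → 1 ≤ p → d < fuel →
      (∀ x : Int, x ∈ vis ↔ 0 ≤ x ∧ x ≤ min (p + 2) (n - 1)) →
      pvLoopA n (n - 1) fuel (vis, pvQ n p) = PySem.Int.floordiv (n + 1) 3 := by
  intro d
  induction d with
  | zero =>
    intro fuel p vis hp hp1 hf hv
    obtain ⟨f, rfl⟩ : ∃ f, fuel = f + 1 := ⟨fuel - 1, by omega⟩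
    have hpe : p = n - 1 := by omega
    have hq : pvQ n p = [(p, pvC p)] := by
      unfold pvQ; rw [if_neg (by omega), if_neg (by omega)]
    rw [hq]
    show pvLoopA n (n-1) (f+1) (vis, (p, pvC p) :: []) = _
    unfold pvLoopA
    rw [if_pos hpe, hpe]
    unfold pvC
    rw [PySem.Int.floordiv_eq_ediv_of_pos (by omega), PySem.Int.floordiv_eq_ediv_of_pos (by omega)]
    omega
  | succ d ih =>
    intro fuel p vis hp hp1 hf hv
    obtain ⟨f, rfl⟩ : ∃ f, fuel = f + 1 := ⟨fuel - 1, by omega⟩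
    have hple : p ≤ n - 2 := by push_cast at hp; omega
    have hmem : ∀ x : Int, 0 ≤ x → x ≤ min (p + 2) (n - 1) → x ∈ vis := by
      intro x h1 h2; exact (hv x).2 ⟨h1, h2⟩
    -- evaluate the three steps from state (vis, rest)
    have hstep : ∀ rest, [(1 : Int), 2, 3].foldl (pvStepA n p (pvC p)) (vis, rest) =
        (if p + 3 ≤ n - 1 then vis.insert (p + 3) else vis,
         if p + 3 ≤ n - 1 then rest ++ [(p + 3, pvC p + 1)] else rest) := by
      intro rest
      have e1 : PySem.Int.mod (p + 1) n = p + 1 := pvMod_small _ _ (by omega) (by omega)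
      have m1 : (p + 1) ∈ vis := hmem _ (by omega) (by omega)
      have s1 : pvStepA n p (pvC p) (vis, rest) 1 = (vis, rest) := by
        unfold pvStepA; rw [e1]; simp [m1]
      have s2 : pvStepA n p (pvC p) (vis, rest) 2 = (vis, rest) := by
        unfold pvStepA
        by_cases h2 : p + 2 ≤ n - 1
        · rw [pvMod_small _ _ (by omega) (by omega)]
          simp [hmem (p+2) (by omega) (by omega)]
        · -- p + 2 = n, wraps to 0
          rw [pvMod_wrap _ _ (by omega) (by omega) (by omega)]
          have : p + 2 - n = 0 := by omega
          rw [this]; simp [hmem 0 (by omega) (by omega)]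
      have s3 : pvStepA n p (pvC p) (vis, rest) 3 =
          (if p + 3 ≤ n - 1 then vis.insert (p + 3) else vis,
           if p + 3 ≤ n - 1 then rest ++ [(p + 3, pvC p + 1)] else rest) := by
        unfold pvStepA
        by_cases h3 : p + 3 ≤ n - 1
        · rw [pvMod_small _ _ (by omega) (by omega)]
          have : ¬ (p + 3) ∈ vis := by
            intro hmemc; have := (hv _).1 hmemc; omega
          simp [h3, this]
        · rw [pvMod_wrap _ _ (by omega) (by omega) (by omega)]
          have hin : (p + 3 - n) ∈ vis := hmem _ (by omega) (by omega)
          simp [h3, hin]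
      simp only [List.foldl, s1, s2, s3]
    have hne : ¬ p = n - 1 := by omega
    by_cases h3 : p + 3 ≤ n - 1
    · have hq : pvQ n p = (p, pvC p) :: [(p + 1, pvC (p + 1)), (p + 2, pvC (p + 2))] := by
        unfold pvQ; rw [if_pos (by omega)]
      rw [hq]
      unfold pvLoopA
      rw [if_neg hne]
      simp only [hstep, if_pos h3]
      have hq' : [(p + 1, pvC (p + 1)), (p + 2, pvC (p + 2))] ++ [(p + 3, pvC p + 1)] = pvQ n (p + 1) := by
        unfold pvQ; rw [if_pos (by omega)]
        have hc : pvC (p + 1 + 2) = pvC p + 1 := by rw [show p + 1 + 2 = p + 3 by ring, pvC_succ3]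
        rw [hc]
        simp only [List.cons_append, List.nil_append]
        ring_nf
      rw [hq']
      exact ih f (p + 1) _ (by push_cast at hp ⊢; omega) (by omega) (by omega)
        (by intro x
            rw [Std.HashSet.mem_insert, beq_iff_eq, hv x]
            omega)
    · by_cases h2 : p + 2 ≤ n - 1
      · -- p + 2 = n - 1
        have hq : pvQ n p = (p, pvC p) :: [(p + 1, pvC (p + 1)), (p + 2, pvC (p + 2))] := by
          unfold pvQ; rw [if_pos (by omega)]
        rw [hq]
        unfold pvLoopA
        rw [if_neg hne]
        simp only [hstep, if_neg h3]
        have hq' : [(p + 1, pvC (p + 1)), (p + 2, pvC (p + 2))] = pvQ n (p + 1) := by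
          unfold pvQ; rw [if_neg (by omega), if_pos (by omega)]; ring_nf
        rw [hq']
        exact ih f (p + 1) vis (by push_cast at hp ⊢; omega) (by omega) (by omega)
          (by intro x; rw [hv x]; omega)
      · -- p + 1 = n - 1
        have hq : pvQ n p = (p, pvC p) :: [(p + 1, pvC (p + 1))] := by
          unfold pvQ; rw [if_neg (by omega), if_pos (by omega)]
        rw [hq]
        unfold pvLoopA
        rw [if_neg hne]
        simp only [hstep, if_neg h3]
        have hq' : [(p + 1, pvC (p + 1))] = pvQ n (p + 1) := by
          unfold pvQ; rw [if_neg (by omega), if_neg (by omega)]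
        rw [hq']
        exact ih f (p + 1) vis (by push_cast at hp ⊢; omega) (by omega) (by omega)
          (by intro x; rw [hv x]; omega)

-- ===== VERDICT (by name: the statement is the Claim_ definition above) =====
theorem min_turns_tabuleiro_spec : Claim_equal_min_turns_tabuleiro := by
  intro n _ hpre
  have hn : 3 ≤ n := hpre
  show min_turns_tabuleiro n = min_turns_tabuleiro_alt n
  unfold min_turns_tabuleiro min_turns_tabuleiro_alt
  rw [if_neg (by omega)]
  obtain ⟨f, hfe⟩ : ∃ f, n.toNat + 1 = f + 1 ∧ n.toNat = f := ⟨n.toNat, rfl, rfl⟩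
  rw [hfe.1]
  -- first iteration: pop (0,0); 1 and 2 are new, 3 % n is new iff n ≥ 4
  show pvLoopA n (n-1) (f+1) ((∅ : Std.HashSet Int).insert 0, (0, 0) :: []) = _
  unfold pvLoopA
  rw [if_neg (by omega)]
  have e1 : PySem.Int.mod (0 + 1) n = 1 := pvMod_small _ _ (by omega) (by omega)
  have e2 : PySem.Int.mod (0 + 2) n = 2 := pvMod_small _ _ (by omega) (by omega)
  have hv0 : ∀ x : Int, x ∈ (∅ : Std.HashSet Int).insert 0 ↔ x = 0 := by
    intro x
    rw [Std.HashSet.mem_insert, beq_iff_eq]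
    simp [Std.HashSet.not_mem_empty]
    omega
  have s1 : pvStepA n 0 0 ((∅ : Std.HashSet Int).insert 0, []) 1 =
      (((∅ : Std.HashSet Int).insert 0).insert 1, [(1, 1)]) := by
    unfold pvStepA; rw [e1]
    have : ¬ (1 : Int) ∈ (∅ : Std.HashSet Int).insert 0 := by rw [hv0]; omega
    simp [this]
  have hv1 : ∀ x : Int, x ∈ ((∅ : Std.HashSet Int).insert 0).insert 1 ↔ x = 0 ∨ x = 1 := by
    intro x; rw [Std.HashSet.mem_insert, beq_iff_eq, hv0]; omega
  have s2 : pvStepA n 0 0 (((∅ : Std.HashSet Int).insert 0).insert 1, [(1, 1)]) 2 =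
      ((((∅ : Std.HashSet Int).insert 0).insert 1).insert 2, [(1, 1), (2, 1)]) := by
    unfold pvStepA; rw [e2]
    have : ¬ (2 : Int) ∈ ((∅ : Std.HashSet Int).insert 0).insert 1 := by rw [hv1]; omega
    simp [this]
  have hv2 : ∀ x : Int, x ∈ (((∅ : Std.HashSet Int).insert 0).insert 1).insert 2 ↔
      x = 0 ∨ x = 1 ∨ x = 2 := by
    intro x; rw [Std.HashSet.mem_insert, beq_iff_eq, hv1]; omega
  have hC1 : pvC 1 = 1 := by
    unfold pvC; rw [PySem.Int.floordiv_eq_ediv_of_pos (by omega)]; decide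
  have hC2 : pvC 2 = 1 := by
    unfold pvC; rw [PySem.Int.floordiv_eq_ediv_of_pos (by omega)]; decide
  have hC3 : pvC 3 = 1 := by
    unfold pvC; rw [PySem.Int.floordiv_eq_ediv_of_pos (by omega)]; decide
  by_cases hn3 : n = 3
  · -- 3 % 3 = 0, already visited: queue stays [(1,1),(2,1)] = pvQ 3 1
    subst hn3
    have e3 : PySem.Int.mod (0 + 3) 3 = 0 := pvMod_wrap _ _ (by omega) (by omega) (by omega)
    have s3 : pvStepA 3 0 0 ((((∅ : Std.HashSet Int).insert 0).insert 1).insert 2, [(1, 1), (2, 1)]) 3 =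
        ((((∅ : Std.HashSet Int).insert 0).insert 1).insert 2, [(1, 1), (2, 1)]) := by
      unfold pvStepA; rw [e3]
      have : (0 : Int) ∈ (((∅ : Std.HashSet Int).insert 0).insert 1).insert 2 := by rw [hv2]; omega
      simp [this]
    have hfold : [(1 : Int), 2, 3].foldl (pvStepA 3 0 0) ((∅ : Std.HashSet Int).insert 0, []) =
        ((((∅ : Std.HashSet Int).insert 0).insert 1).insert 2, pvQ 3 1) := by
      simp only [List.foldl, s1, s2, s3]
      unfold pvQ
      rw [if_neg (by omega), if_pos (by omega)]
      have h2 : pvC (1 + 1) = 1 := by norm_num [hC2]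
      rw [hC1, h2]
      norm_num
    rw [hfold]
    exact pvLoop_inv 3 (by omega) 1 f 1 _ (by omega) (by omega) (by omega)
      (by intro x; rw [hv2]; omega)
  · -- n ≥ 4: 3 % n = 3 is new: queue becomes [(1,1),(2,1),(3,1)] = pvQ n 1
    have hn4 : 4 ≤ n := by omega
    have e3 : PySem.Int.mod (0 + 3) n = 3 := pvMod_small _ _ (by omega) (by omega)
    have s3 : pvStepA n 0 0 ((((∅ : Std.HashSet Int).insert 0).insert 1).insert 2, [(1, 1), (2, 1)]) 3 =
        (((((∅ : Std.HashSet Int).insert 0).insert 1).insert 2).insert 3, [(1, 1), (2, 1), (3, 1)]) := by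
      unfold pvStepA; rw [e3]
      have : ¬ (3 : Int) ∈ (((∅ : Std.HashSet Int).insert 0).insert 1).insert 2 := by rw [hv2]; omega
      simp [this]
    have hfold : [(1 : Int), 2, 3].foldl (pvStepA n 0 0) ((∅ : Std.HashSet Int).insert 0, []) =
        (((((∅ : Std.HashSet Int).insert 0).insert 1).insert 2).insert 3, pvQ n 1) := by
      simp only [List.foldl, s1, s2, s3]
      unfold pvQ
      rw [if_pos (by omega)]
      have h2 : pvC (1 + 1) = 1 := by norm_num [hC2]
      have h3 : pvC (1 + 2) = 1 := by norm_num [hC3]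
      rw [hC1, h2, h3]
      norm_num
    rw [hfold]
    exact pvLoop_inv n hn ((n - 2).toNat) f 1 _ (by omega) (by omega) (by omega)
      (by intro x
          rw [Std.HashSet.mem_insert, beq_iff_eq, hv2]
          omega)
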